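-- pv_equiv track=rewrite | github.com/KSoonYo/TIL | Algorithm/Programmers/python/programmers_lv2_디펜스게임/s1.py | solution
-- ===== SOURCE A (Python) =====
-- import heapq
--
-- def solution(n, k, enemy):
--     '''
--     현재 적의 수가 남은 병사의 수보다 크면, 이전 라운드에서 가장 많은 병사가 죽은 라운드의 병사를 k - 1 해서 소생
--     --> 50% fail
--     --> 수정) 일단 현재 막을 적의 수를 heapq에 넣어놓고, 남은 병사 수가 적보다 적고 k가 0보다 크면 무적권을 사용해서 병사 수를 보강한 후에 적을 방어
--     '''
--
--     if k >= len(enemy):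
--         return len(enemy)
--
--     q = []
--     rnd = 0
--     for amount in enemy:
--         heapq.heappush(q, (-amount, amount))  # 최대 힙 유지
--         if n < amount and k > 0:
--             n += heapq.heappop(q)[1]          # 회복
--             k -= 1
--         elif n < amount:
--             break
--         n -= amount                           # 방어
--         rnd += 1
--
--     return rnd
-- ===== SOURCE B (Python) =====
-- def _insert_desc(xs, v):
--     # keep xs sorted in descending order
--     i = 0
--     while i < len(xs) and xs[i] >= v:
--         i += 1
--     xs.insert(i, v)
--
-- def _top_uncovered(seen, skipped):
--     # both descending, skipped a sub-multiset of seen with fewer elements: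
--     # cancel covered enemies against the top of seen, return the first survivor
--     i = 0
--     for s in skipped:
--         if s != seen[i]:
--             break
--         i += 1
--     return seen[i]
--
-- def solution(n, k, enemy):
--     seen = []      # every enemy seen so far, descending; never removed from
--     skipped = []   # the enemies covered by invincibility so far, descending
--     rnd = 0
--     for a in enemy:
--         _insert_desc(seen, a)
--         if n < a:
--             if len(skipped) >= k:
--                 break
--             r = _top_uncovered(seen, skipped)
--             _insert_desc(skipped, r)
--             n += r
--         n -= a
--         rnd += 1
--     return rnd
-- ===== Notes on version B (the rewrite author's own statement) =====
-- stated objective: alternative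
-- what changed: Replaces A's max-heap of (-amount, amount) tuples (push/pop) with two insertion-sorted descending lists -- all enemies seen and the ones covered by invincibility, never removed from -- finding each refund value as the largest enemy not yet covered via a top-down cancel of the two sorted lists.
import Mathlib
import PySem

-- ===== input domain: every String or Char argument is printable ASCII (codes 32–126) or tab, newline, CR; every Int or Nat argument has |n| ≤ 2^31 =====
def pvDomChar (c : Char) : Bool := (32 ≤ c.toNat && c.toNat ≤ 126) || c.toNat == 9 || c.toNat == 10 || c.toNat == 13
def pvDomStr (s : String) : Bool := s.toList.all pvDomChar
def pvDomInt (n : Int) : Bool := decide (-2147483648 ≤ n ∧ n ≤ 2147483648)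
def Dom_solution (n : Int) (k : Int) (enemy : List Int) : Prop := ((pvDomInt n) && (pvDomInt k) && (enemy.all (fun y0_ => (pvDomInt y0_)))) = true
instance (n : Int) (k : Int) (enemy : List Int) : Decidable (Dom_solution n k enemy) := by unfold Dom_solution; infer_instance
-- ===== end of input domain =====

-- B replaces A's max-heap of (-amount, amount) tuples by two sorted lists (all
-- enemies seen, and the ones covered by invincibility) with a top-down cancel
-- to find the largest uncovered enemy: an alternative, heap-free mechanism.

-- ===== PORT A =====
-- A's heap q of tuples (-amount, amount) is modelled by the list of the amounts
-- it holds: heappush = cons, and heappop(q)[1] returns the LARGEST amount held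
-- (the min tuple; equal amounts give identical tuples), so the pop is ported
-- exactly as "take the maximum amount, remove one occurrence of it".
def pvMaxD : List Int → Int
  | [] => 0                      -- never used: the heap is non-empty at every pop
  | x :: xs => xs.foldl max x

def pvRemoveFirst : List Int → Int → List Int
  | [], _ => []
  | x :: xs, m => if x = m then xs else x :: pvRemoveFirst xs m

def loopA : List Int → Int → Int → List Int → Int → Int
  | [], _, _, _, rnd => rnd
  | a :: rest, n, k, q, rnd =>
    let q' := a :: q
    if n < a ∧ k > 0 then
      let m := pvMaxD q'
      loopA rest (n + m - a) (k - 1) (pvRemoveFirst q' m) (rnd + 1)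
    else if n < a then rnd
    else loopA rest (n - a) k q' (rnd + 1)

def solution (n : Int) (k : Int) (enemy : List Int) : Int :=
  if k ≥ (enemy.length : Int) then (enemy.length : Int)
  else loopA enemy n k [] 0

-- ===== PORT B =====
-- _insert_desc(xs, v): insert v keeping xs sorted descending
def insDesc : List Int → Int → List Int
  | [], v => [v]
  | x :: xs, v => if x ≥ v then x :: insDesc xs v else v :: x :: xs

-- _top_uncovered(seen, skipped): cancel the covered enemies against the top of
-- seen going down, return the first survivor (seen is strictly longer whenever
-- B calls this, so the Python indexing never goes out of range; defaults 0 are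
-- unreachable)
def topUncov : List Int → List Int → Int
  | seen, [] => seen.headD 0
  | [], _ :: _ => 0
  | x :: xs, s :: ss => if s ≠ x then x else topUncov xs ss

def loopB : List Int → Int → Int → List Int → List Int → Int → Int
  | [], _, _, _, _, rnd => rnd
  | a :: rest, n, k, seen, skipped, rnd =>
    let seen' := insDesc seen a
    if n < a then
      if (skipped.length : Int) ≥ k then rnd
      else
        let r := topUncov seen' skipped
        loopB rest (n + r - a) k seen' (insDesc skipped r) (rnd + 1)
    else loopB rest (n - a) k seen' skipped (rnd + 1)

def solution_alt (n : Int) (k : Int) (enemy : List Int) : Int :=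
  loopB enemy n k [] [] 0

-- ===== PRECONDITION & SPEC =====
def Spec_solution (n : Int) (k : Int) (enemy : List Int) (out : Int) : Prop := out = solution_alt n k enemy
instance (n : Int) (k : Int) (enemy : List Int) (out : Int) : Decidable (Spec_solution n k enemy out) := by unfold Spec_solution; infer_instance

-- ===== CLAIM (what is proved, stated in full; the proofs are below) =====
def Claim_equal_solution : Prop := ∀ (n : Int) (k : Int) (enemy : List Int), Dom_solution n k enemy → Spec_solution n k enemy (solution n k enemy)

-- ===== LEMMAS AND PROOFS =====

-- occurrence count, the currency of the loop invariant
def cnt : List Int → Int → Nat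
  | [], _ => 0
  | y :: ys, x => (if y = x then 1 else 0) + cnt ys x

theorem cnt_insDesc (l : List Int) (v x : Int) :
    cnt (insDesc l v) x = (if v = x then 1 else 0) + cnt l x := by
  induction l with
  | nil => simp [insDesc, cnt]
  | cons y ys ih =>
    by_cases h : y ≥ v <;> simp [insDesc, h, cnt, ih] <;> omega

theorem len_insDesc (l : List Int) (v : Int) : (insDesc l v).length = l.length + 1 := by
  induction l with
  | nil => simp [insDesc]
  | cons y ys ih => by_cases h : y ≥ v <;> simp [insDesc, h, ih]

theorem mem_insDesc {l : List Int} {v x : Int} :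
    x ∈ insDesc l v ↔ x = v ∨ x ∈ l := by
  induction l with
  | nil => simp [insDesc]
  | cons y ys ih =>
    by_cases h : y ≥ v <;> simp [insDesc, h, ih] <;> tauto

theorem insDesc_sorted {l : List Int} (v : Int) (h : l.Pairwise (· ≥ ·)) :
    (insDesc l v).Pairwise (· ≥ ·) := by
  induction l with
  | nil => simp [insDesc]
  | cons y ys ih =>
    rcases List.pairwise_cons.mp h with ⟨hy, hys⟩
    by_cases hge : y ≥ v
    · simp only [insDesc, if_pos hge]
      refine List.pairwise_cons.mpr ⟨?_, ih hys⟩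
      intro z hz
      rcases mem_insDesc.mp hz with rfl | hz
      · exact hge
      · exact hy z hz
    · simp only [insDesc, if_neg hge]
      refine List.pairwise_cons.mpr ⟨?_, h⟩
      intro z hz
      rcases List.mem_cons.mp hz with rfl | hz
      · omega
      · have := hy z hz; omega

theorem cnt_pos {l : List Int} {x : Int} : 0 < cnt l x ↔ x ∈ l := by
  induction l with
  | nil => simp [cnt]
  | cons y ys ih =>
    by_cases h : y = x <;> simp [cnt, h, ih] <;> omega

theorem cnt_removeFirst (l : List Int) (m x : Int) (hm : m ∈ l) :
    cnt (pvRemoveFirst l m) x + (if m = x then 1 else 0) = cnt l x := by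
  induction l with
  | nil => simp at hm
  | cons y ys ih =>
    by_cases h : y = m
    · subst h; simp [pvRemoveFirst, cnt]; omega
    · have hm' : m ∈ ys := by
        rcases List.mem_cons.mp hm with h' | h'
        · omega
        · exact h'
      simp only [pvRemoveFirst, if_neg h, cnt]
      have := ih hm'
      omega

-- max facts for pvMaxD
theorem le_foldl_max : ∀ (l : List Int) (a b : Int), b ≤ a → b ≤ l.foldl max a := by
  intro l
  induction l with
  | nil => intro a b h; simpa using h
  | cons c cs ih =>
    intro a b h
    simp only [List.foldl_cons]
    exact ih (max a c) b (le_trans h (le_max_left a c))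

theorem mem_le_foldl_max : ∀ (l : List Int) (a x : Int), x ∈ l → x ≤ l.foldl max a := by
  intro l
  induction l with
  | nil => intro a x h; simp at h
  | cons c cs ih =>
    intro a x h
    simp only [List.foldl_cons]
    rcases List.mem_cons.mp h with rfl | h
    · exact le_foldl_max cs (max a x) x (le_max_right a x)
    · exact ih (max a c) x h

theorem foldl_max_mem : ∀ (l : List Int) (a : Int), l.foldl max a = a ∨ l.foldl max a ∈ l := by
  intro l
  induction l with
  | nil => intro a; left; simp
  | cons c cs ih =>
    intro a
    simp only [List.foldl_cons]
    rcases ih (max a c) with h | h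
    · rcases max_choice a c with h' | h'
      · left; rw [h, h']
      · right; rw [h, h']; exact List.mem_cons_self
    · right; exact List.mem_cons_of_mem c h

theorem pvMaxD_spec {l : List Int} (h : l ≠ []) :
    pvMaxD l ∈ l ∧ ∀ x ∈ l, x ≤ pvMaxD l := by
  match l with
  | x :: xs =>
    constructor
    · rcases foldl_max_mem xs x with h' | h'
      · rw [pvMaxD, h']; exact List.mem_cons_self
      · exact List.mem_cons_of_mem x h'
    · intro y hy
      rcases List.mem_cons.mp hy with rfl | hy
      · exact le_foldl_max xs y y le_rfl
      · exact mem_le_foldl_max xs x y hy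

-- head of a descending list bounds its members
theorem pairwise_head_bound {x : Int} {xs : List Int} (h : (x :: xs).Pairwise (· ≥ ·))
    {y : Int} (hy : y ∈ x :: xs) : y ≤ x := by
  rcases List.mem_cons.mp hy with rfl | hy
  · exact le_rfl
  · exact (List.pairwise_cons.mp h).1 y hy

-- topUncov computes the largest value with cnt skipped < cnt seen
theorem topUncov_spec : ∀ (skipped seen : List Int),
    seen.Pairwise (· ≥ ·) → skipped.Pairwise (· ≥ ·) →
    (∀ x, cnt skipped x ≤ cnt seen x) →
    (∃ y, cnt skipped y < cnt seen y) →
    cnt skipped (topUncov seen skipped) < cnt seen (topUncov seen skipped) ∧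
      ∀ x, cnt skipped x < cnt seen x → x ≤ topUncov seen skipped := by
  intro skipped
  induction skipped with
  | nil =>
    intro seen hs _ _ hex
    rcases hex with ⟨y, hy⟩
    match seen with
    | [] => simp [cnt] at hy
    | x :: xs =>
      simp only [topUncov, List.headD]
      constructor
      · simp [cnt]
      · intro z hz
        have hzmem : z ∈ x :: xs := cnt_pos.mp (by simp [cnt] at hz ⊢; omega)
        exact pairwise_head_bound hs hzmem
  | cons s ss ih =>
    intro seen hs hsk hle hex
    match seen with
    | [] =>
      exfalso; rcases hex with ⟨y, hy⟩; simp [cnt] at hy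
    | x :: xs =>
      have hsmem : s ∈ x :: xs := by
        have : 0 < cnt (s :: ss) s := by simp [cnt]
        exact cnt_pos.mp (lt_of_lt_of_le this (hle s))
      have hsx : s ≤ x := pairwise_head_bound hs hsmem
      by_cases hne : s ≠ x
      · -- s < x, so x is uncovered and maximal
        simp only [topUncov, if_pos hne]
        have hxskip : cnt (s :: ss) x = 0 := by
          by_contra hc
          have : x ∈ s :: ss := cnt_pos.mp (by omega)
          have := pairwise_head_bound hsk this
          omega
        constructor
        · have : 0 < cnt (x :: xs) x := by simp [cnt]
          omega
        · intro z hz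
          have hzmem : z ∈ x :: xs := cnt_pos.mp (by omega)
          exact pairwise_head_bound hs hzmem
      · -- s = x: cancel and recurse
        push_neg at hne
        subst hne
        simp only [topUncov, ne_eq, not_true_eq_false, if_neg, not_false_eq_true,
          if_false]
        have hle' : ∀ z, cnt ss z ≤ cnt xs z := by
          intro z
          have := hle z
          by_cases hzs : s = z <;> simp [cnt, hzs] at this ⊢ <;> omega
        have hex' : ∃ y, cnt ss y < cnt xs y := by
          rcases hex with ⟨y, hy⟩
          refine ⟨y, ?_⟩
          by_cases hys : s = y <;> simp [cnt, hys] at hy <;> omega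
        have hs' := (List.pairwise_cons.mp hs).2
        have hsk' := (List.pairwise_cons.mp hsk).2
        rcases ih xs hs' hsk' hle' hex' with ⟨h1, h2⟩
        constructor
        · by_cases hts : s = topUncov xs ss <;> simp [cnt, hts] <;> omega
        · intro z hz
          refine h2 z ?_
          by_cases hzs : s = z <;> simp [cnt, hzs] at hz <;> omega

-- the loops agree under the documented invariant: q holds exactly the enemies
-- seen and not covered, and A's remaining card count kA is k minus the covers used
theorem loop_eq : ∀ (rest : List Int) (n kA rnd : Int) (q seen skipped : List Int) (k : Int),
    seen.Pairwise (· ≥ ·) → skipped.Pairwise (· ≥ ·) →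
    (∀ x, cnt q x + cnt skipped x = cnt seen x) →
    kA + (skipped.length : Int) = k →
    loopA rest n kA q rnd = loopB rest n k seen skipped rnd := by
  intro rest
  induction rest with
  | nil => intro n kA rnd q seen skipped k _ _ _ _; simp [loopA, loopB]
  | cons a rest ih =>
    intro n kA rnd q seen skipped k hs hsk hq hk
    simp only [loopA, loopB]
    have hq' : ∀ x, cnt (a :: q) x + cnt skipped x = cnt (insDesc seen a) x := by
      intro x; simp [cnt, cnt_insDesc]; have := hq x; omega
    have hs' : (insDesc seen a).Pairwise (· ≥ ·) := insDesc_sorted a hs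
    by_cases h1 : n < a
    · by_cases h2 : kA > 0
      · -- refund in both
        have hkcond : ¬ ((skipped.length : Int) ≥ k) := by omega
        simp only [if_pos (And.intro h1 h2), if_pos h1, if_neg hkcond]
        -- the popped maximum equals the top uncovered value
        have hle' : ∀ x, cnt skipped x ≤ cnt (insDesc seen a) x := by
          intro x; have := hq' x; omega
        have hex : ∃ y, cnt skipped y < cnt (insDesc seen a) y := by
          refine ⟨a, ?_⟩
          have : 0 < cnt (a :: q) a := by simp [cnt]
          have := hq' a; omega
        rcases topUncov_spec skipped (insDesc seen a) hs' hsk hle' hex with ⟨t1, t2⟩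
        rcases pvMaxD_spec (l := a :: q) (by simp) with ⟨m1, m2⟩
        set m := pvMaxD (a :: q) with hm
        set r := topUncov (insDesc seen a) skipped with hr
        have hmr : m = r := by
          have hm_lt : cnt skipped m < cnt (insDesc seen a) m := by
            have : 0 < cnt (a :: q) m := cnt_pos.mpr m1
            have := hq' m; omega
          have h1' : m ≤ r := t2 m hm_lt
          have hrq : r ∈ a :: q := by
            have := hq' r
            exact cnt_pos.mp (by omega)
          have h2' : r ≤ m := m2 r hrq
          omega
        rw [hmr]
        refine ih (n + r - a) (kA - 1) (rnd + 1) (pvRemoveFirst (a :: q) r)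
          (insDesc seen a) (insDesc skipped r) k hs' (insDesc_sorted r hsk) ?_ ?_
        · intro x
          have hrm : r ∈ a :: q := by rw [← hmr]; exact m1
          have h5 := cnt_removeFirst (a :: q) r x hrm
          have h6 := hq' x
          rw [cnt_insDesc]
          by_cases hrx : r = x
          · rw [if_pos hrx] at h5; rw [if_pos hrx]; omega
          · rw [if_neg hrx] at h5; rw [if_neg hrx]; omega
        · rw [len_insDesc]; push_cast; omega
      · -- break in both
        have hkcond : (skipped.length : Int) ≥ k := by omega
        have : ¬ (n < a ∧ kA > 0) := by tauto
        simp [if_neg this, if_pos h1, if_pos hkcond]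
    · -- plain fight in both
      have : ¬ (n < a ∧ kA > 0) := by tauto
      simp only [if_neg this, if_neg h1]
      exact ih (n - a) kA (rnd + 1) (a :: q) (insDesc seen a) skipped k hs' hsk hq' hk

-- with k cards for every enemy left, B never stops early
theorem loopB_all : ∀ (rest : List Int) (n k : Int) (seen skipped : List Int) (rnd : Int),
    (skipped.length : Int) + (rest.length : Int) ≤ k →
    loopB rest n k seen skipped rnd = rnd + (rest.length : Int) := by
  intro rest
  induction rest with
  | nil => intro n k seen skipped rnd _; simp [loopB]
  | cons a rest ih =>
    intro n k seen skipped rnd h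
    simp only [List.length_cons] at h
    push_cast at h
    simp only [loopB]
    by_cases h1 : n < a
    · have hkcond : ¬ ((skipped.length : Int) ≥ k) := by omega
      simp only [if_pos h1, if_neg hkcond]
      rw [ih _ _ _ _ _ (by rw [len_insDesc]; push_cast; omega)]
      push_cast [List.length_cons]; ring
    · simp only [if_neg h1]
      rw [ih _ _ _ _ _ (by push_cast; omega)]
      push_cast [List.length_cons]; ring

-- ===== VERDICT (by name: the statement is the Claim_ definition above) =====
theorem solution_spec : Claim_equal_solution := by
  intro n k enemy _
  unfold Spec_solution solution solution_alt
  by_cases h : k ≥ (enemy.length : Int)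
  · rw [if_pos h, loopB_all enemy n k [] [] 0 (by simpa using h)]
    ring
  · rw [if_neg h]
    exact loop_eq enemy n k 0 [] [] [] k (by simp) (by simp) (fun x => by simp [cnt]) (by simp)
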